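-- pv_equiv track=rewrite | github.com/tdealtry/WCSim | sample-root-scripts/kin_converter.py | GetVertex
-- ===== SOURCE A (Python) =====
-- def GetVertex(seq, group_by, exclude=['']):
--     data = []
--     for line in seq:
--         if isinstance(line, bytes):
--             line = line.decode()
--         if line.startswith(group_by):
--             if data:
--                 yield data
--                 data = []
--         if line.strip() in exclude:
--             continue
--         data.append(line)
--
--     if data:
--         yield data
-- ===== SOURCE B (Python) =====
-- def _split(lines, group_by):
--     # Split into runs: each run starts at index 0 or at a line that startswith(group_by),
--     # and extends up to (not including) the next such boundary line.
--     chunks = []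
--     i = 0
--     n = len(lines)
--     while i < n:
--         j = i + 1
--         while j < n and not lines[j].startswith(group_by):
--             j += 1
--         chunks.append(lines[i:j])
--         i = j
--     return chunks
--
-- def GetVertex(seq, group_by, exclude=['']):
--     lines = [l.decode() if isinstance(l, bytes) else l for l in seq]
--     out = []
--     for chunk in _split(lines, group_by):
--         kept = [l for l in chunk if l.strip() not in exclude]
--         if kept:
--             out.append(kept)
--     return out
-- ===== Notes on version B (the rewrite author's own statement) =====
-- stated objective: alternative
-- what changed: Replaces A's single stateful generator loop (accumulator flushed at each boundary) with a three-stage pipeline: first split the sequence into runs at boundary lines by index scanning, then filter excluded lines from each run, then drop empty runs.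
import Mathlib
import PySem

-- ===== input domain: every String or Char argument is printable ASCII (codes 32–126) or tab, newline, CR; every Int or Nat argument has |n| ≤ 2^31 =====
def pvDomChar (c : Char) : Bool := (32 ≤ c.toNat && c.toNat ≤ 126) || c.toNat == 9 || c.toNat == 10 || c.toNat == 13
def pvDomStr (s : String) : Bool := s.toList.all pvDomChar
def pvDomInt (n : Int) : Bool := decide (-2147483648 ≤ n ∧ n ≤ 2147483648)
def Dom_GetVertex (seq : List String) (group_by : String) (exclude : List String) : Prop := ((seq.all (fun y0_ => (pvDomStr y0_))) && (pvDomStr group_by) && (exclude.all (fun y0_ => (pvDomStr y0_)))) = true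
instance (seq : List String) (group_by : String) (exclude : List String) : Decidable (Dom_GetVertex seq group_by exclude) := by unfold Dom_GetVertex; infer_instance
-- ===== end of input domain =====

-- B replaces A's stateful accumulator loop with a split-into-runs / filter / drop-empty
-- pipeline (objective: alternative decomposition, same cost).
-- Equivalence is about the RETURN value (A is a generator; list(A(...)) is compared).

-- ===== PORT A =====
-- A's generator for-loop: `yield data` becomes cons; `data` is the loop state;
-- the trailing `if data: yield data` is the base case.
def GetVertexLoop (gb : String) (excl : List String) : List String → List String → List (List String)
  | [], data => if data.isEmpty then [] else [data]
  | line :: rest, data =>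
    if PySem.Str.startswith line gb ∧ ¬ data.isEmpty then
      -- yield data; data = []; then the exclude test / append for this same line
      data :: GetVertexLoop gb excl rest (if PySem.Str.strip line ∈ excl then [] else [line])
    else
      GetVertexLoop gb excl rest (if PySem.Str.strip line ∈ excl then data else data ++ [line])

def GetVertex (seq : List String) (group_by : String) (exclude : List String) : List (List String) :=
  GetVertexLoop group_by exclude seq []

-- ===== PORT B =====
-- Source B's _split: the outer while over i is recursion on the suffix; the inner
-- while-scan for the next boundary is takeWhile/dropWhile on the tail
def pvSplit (gb : String) : List String → List (List String)
  | [] => []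
  | h :: t =>
    (h :: t.takeWhile (fun l => !PySem.Str.startswith l gb)) ::
      pvSplit gb (t.dropWhile (fun l => !PySem.Str.startswith l gb))
termination_by l => l.length
decreasing_by
  simpa using Nat.lt_succ_of_le (List.length_dropWhile_le _ _)

def pvKept (excl : List String) (c : List String) : List String :=
  c.filter (fun l => !decide (PySem.Str.strip l ∈ excl))

def GetVertex_alt (seq : List String) (group_by : String) (exclude : List String) : List (List String) :=
  ((pvSplit group_by seq).map (pvKept exclude)).filter (fun c => !c.isEmpty)

-- ===== PRECONDITION & SPEC =====
def Spec_GetVertex (seq : List String) (group_by : String) (exclude : List String) (out : List (List String)) : Prop := out = GetVertex_alt seq group_by exclude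
instance (seq : List String) (group_by : String) (exclude : List String) (out : List (List String)) : Decidable (Spec_GetVertex seq group_by exclude out) := by unfold Spec_GetVertex; infer_instance

-- ===== CLAIM (what is proved, stated in full; the proofs are below) =====
def Claim_equal_GetVertex : Prop := ∀ (seq : List String) (group_by : String) (exclude : List String), Dom_GetVertex seq group_by exclude → Spec_GetVertex seq group_by exclude (GetVertex seq group_by exclude)

-- ===== LEMMAS AND PROOFS =====

-- the chunks yielded by "if data: yield data"
def pvEmit (d : List String) : List (List String) := if d.isEmpty then [] else [d]

theorem pvKept_cons (excl : List String) (h : String) (t : List String) :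
    pvKept excl (h :: t) = (if PySem.Str.strip h ∈ excl then [] else [h]) ++ pvKept excl t := by
  by_cases he : PySem.Str.strip h ∈ excl <;> simp [pvKept, he]

theorem loop_head (gb : String) (excl : List String) (h : String) (t : List String) :
    GetVertexLoop gb excl (h :: t) [] = GetVertexLoop gb excl t (pvKept excl [h]) := by
  have : pvKept excl [h] = if PySem.Str.strip h ∈ excl then [] else [h] := by
    rw [pvKept_cons]; simp [pvKept]
  rw [this]
  simp [GetVertexLoop]

theorem loop_boundary (gb : String) (excl : List String) (b : String) (t : List String)
    (hb : PySem.Str.startswith b gb = true) (d : List String) :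
    GetVertexLoop gb excl (b :: t) d = pvEmit d ++ GetVertexLoop gb excl (b :: t) [] := by
  cases d with
  | nil => simp [pvEmit]
  | cons x xs =>
    rw [loop_head]
    have : pvKept excl [b] = if PySem.Str.strip b ∈ excl then [] else [b] := by
      rw [pvKept_cons]; simp [pvKept]
    rw [this]
    rw [PySem.Str.startswith_eq] at hb
    simp [GetVertexLoop, pvEmit, hb]

theorem loop_prefix (gb : String) (excl : List String) :
    ∀ (pre post : List String) (d : List String),
      (∀ l ∈ pre, PySem.Str.startswith l gb = false) →
      GetVertexLoop gb excl (pre ++ post) d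
        = GetVertexLoop gb excl post (d ++ pvKept excl pre) := by
  intro pre
  induction pre with
  | nil => intro post d _; simp [pvKept]
  | cons h t ih =>
    intro post d hall
    have hh : PySem.Str.startswith h gb = false := hall h (by simp)
    have ht : ∀ l ∈ t, PySem.Str.startswith l gb = false := fun l hl => hall l (by simp [hl])
    have hstep : GetVertexLoop gb excl ((h :: t) ++ post) d
        = GetVertexLoop gb excl (t ++ post) (if PySem.Str.strip h ∈ excl then d else d ++ [h]) := by
      rw [PySem.Str.startswith_eq] at hh
      simp [GetVertexLoop, hh]
    rw [hstep, ih post _ ht, pvKept_cons]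
    by_cases he : PySem.Str.strip h ∈ excl <;> simp [he]

theorem dropWhile_head_false {α : Type} (p : α → Bool) :
    ∀ (l : List α) (b : α) (rest : List α), l.dropWhile p = b :: rest → p b = false := by
  intro l
  induction l with
  | nil => intro b rest h; simp [List.dropWhile] at h
  | cons x xs ih =>
    intro b rest h
    by_cases hx : p x
    · exact ih b rest (by simpa [List.dropWhile, hx] using h)
    · simp [List.dropWhile, hx] at h
      simp [← h.1, hx]

theorem loop_eq_alt (gb : String) (excl : List String) :
    ∀ (n : Nat) (lines : List String), lines.length ≤ n →
      GetVertexLoop gb excl lines [] = GetVertex_alt lines gb excl := by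
  intro n
  induction n with
  | zero =>
    intro lines hlen
    have : lines = [] := List.length_eq_zero_iff.mp (Nat.le_zero.mp hlen)
    subst this
    simp [GetVertexLoop, GetVertex_alt, pvSplit]
  | succ n ih =>
    intro lines hlen
    cases lines with
    | nil => simp [GetVertexLoop, GetVertex_alt, pvSplit]
    | cons h t =>
      have hsplit : t = t.takeWhile (fun l => !PySem.Str.startswith l gb)
          ++ t.dropWhile (fun l => !PySem.Str.startswith l gb) :=
        (List.takeWhile_append_dropWhile).symm
      have hpre : ∀ x ∈ t.takeWhile (fun l => !PySem.Str.startswith l gb),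
          PySem.Str.startswith x gb = false := by
        intro x hx
        simpa using List.mem_takeWhile_imp hx
      rw [loop_head]
      conv_lhs => rw [hsplit]
      rw [loop_prefix gb excl _ _ _ hpre]
      have hkk : pvKept excl [h] ++ pvKept excl (t.takeWhile (fun l => !PySem.Str.startswith l gb))
          = pvKept excl (h :: t.takeWhile (fun l => !PySem.Str.startswith l gb)) := by
      -- pvKept [h] ++ pvKept pre = pvKept (h :: pre)
        rw [pvKept_cons]
        by_cases he : PySem.Str.strip h ∈ excl <;> simp [pvKept, he]
      rw [hkk]
      have halt : GetVertex_alt (h :: t) gb excl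
          = pvEmit (pvKept excl (h :: t.takeWhile (fun l => !PySem.Str.startswith l gb)))
            ++ GetVertex_alt (t.dropWhile (fun l => !PySem.Str.startswith l gb)) gb excl := by
        simp only [GetVertex_alt, pvSplit, List.map_cons, List.filter_cons, pvEmit]
        cases hE : (pvKept excl (h :: t.takeWhile fun l => !PySem.Str.startswith l gb)).isEmpty <;>
          simp
      rw [halt]
      cases hdrop : t.dropWhile (fun l => !PySem.Str.startswith l gb) with
      | nil =>
        simp only [GetVertexLoop, GetVertex_alt, pvSplit, pvEmit]
        simp
      | cons b rest =>
        have hb : PySem.Str.startswith b gb = true := by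
          have := dropWhile_head_false (fun l => !PySem.Str.startswith l gb) t b rest hdrop
          simpa using this
        rw [loop_boundary gb excl b rest hb]
        have hlen2 : (b :: rest).length ≤ n := by
          have := List.length_dropWhile_le (fun l => !PySem.Str.startswith l gb) t
          rw [hdrop] at this
          have := Nat.le_trans this (Nat.le_of_succ_le_succ (by simpa using hlen))
          exact this
        rw [ih (b :: rest) hlen2]

-- ===== VERDICT (by name: the statement is the Claim_ definition above) =====
theorem GetVertex_spec : Claim_equal_GetVertex := by
  intro seq gb excl _
  unfold Spec_GetVertex GetVertex
  exact loop_eq_alt gb excl seq.length seq (Nat.le_refl _)
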